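-- pv_equiv track=rewrite | github.com/posl/comment_recommendation | script/split_gen/3_time/zh/119_C/7.py | getMinMP
-- ===== SOURCE A (Python) =====
-- def getMinMP(N, A, B, C, l):
--     minMP = 10000
--     for i in range(2**N):
--         if i == 0:
--             continue
--         mp = 0
--         a = []
--         b = []
--         c = []
--         for j in range(N):
--             if (i >> j) & 1:
--                 a.append(l[j])
--             else:
--                 b.append(l[j])
--         for k in range(len(a)):
--             mp += a[k]
--         for k in range(len(b)):
--             mp += b[k]
--         if A in a and B in a and C in a:
--             mp -= 30
--         if A in b and B in b and C in b:
--             mp -= 30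
--         if A in a and B in b and C in b:
--             mp -= 10
--         if A in b and B in a and C in b:
--             mp -= 10
--         if A in b and B in b and C in a:
--             mp -= 10
--         if A in a and B in a and C in b:
--             mp -= 10
--         if A in b and B in a and C in a:
--             mp -= 10
--         if A in a and B in b and C in a:
--             mp -= 10
--         if A in a and B in a and C in a:
--             mp -= 20
--         if A in b and B in b and C in b:
--             mp -= 20
--         if mp < minMP:
--             minMP = mp
--     return minMP
-- ===== SOURCE B (Python) =====
-- def getMinMP(N, A, B, C, l):
--     # Every partition costs sum(l[:N]); track only which of the two groups
--     # contain A, B, C (7-bit states, <=128 of them) with a DP over positions,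
--     # then take the best discount -- O(N) instead of O(2**N * N).
--     S = 0
--     for j in range(N):
--         S += l[j]
--     # state: (a_nonempty, A in a, A in b, B in a, B in b, C in a, C in b)
--     states = {(False, False, False, False, False, False, False)}
--     for j in range(N):
--         v = l[j]
--         nxt = set()
--         for (ne, aA, bA, aB, bB, aC, bC) in states:
--             nxt.add((True, aA or v == A, bA, aB or v == B, bB, aC or v == C, bC))
--             nxt.add((ne, aA, bA or v == A, aB, bB or v == B, aC, bC or v == C))
--         states = nxt
--     best = 10000
--     for (ne, aA, bA, aB, bB, aC, bC) in states:
--         if ne: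
--             disc = 0
--             if aA and aB and aC:
--                 disc += 50
--             if bA and bB and bC:
--                 disc += 50
--             for (x, y, z) in ((aA, bB, bC), (bA, aB, bC), (bA, bB, aC),
--                               (aA, aB, bC), (bA, aB, aC), (aA, bB, aC)):
--                 if x and y and z:
--                     disc += 10
--             best = min(best, S - disc)
--     return best
-- ===== Notes on version B (the rewrite author's own statement) =====
-- stated objective: faster
-- what changed: A enumerates all 2**N bitmask partitions and rescans both groups for A/B/C membership per mask; B does one left-to-right DP over the list keeping only the <=128 reachable (a-nonempty, A/B/C in group a / group b) states and takes the best discount from sum(l[:N]); intended as asymptotically faster (O(N) vs O(2^N*N)); a timing run measured B 11.77x at N=16 and A timing out at N=64 where B still returns, but could not confirm a ratio at a size where both finish for >=5ms.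
import Mathlib
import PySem

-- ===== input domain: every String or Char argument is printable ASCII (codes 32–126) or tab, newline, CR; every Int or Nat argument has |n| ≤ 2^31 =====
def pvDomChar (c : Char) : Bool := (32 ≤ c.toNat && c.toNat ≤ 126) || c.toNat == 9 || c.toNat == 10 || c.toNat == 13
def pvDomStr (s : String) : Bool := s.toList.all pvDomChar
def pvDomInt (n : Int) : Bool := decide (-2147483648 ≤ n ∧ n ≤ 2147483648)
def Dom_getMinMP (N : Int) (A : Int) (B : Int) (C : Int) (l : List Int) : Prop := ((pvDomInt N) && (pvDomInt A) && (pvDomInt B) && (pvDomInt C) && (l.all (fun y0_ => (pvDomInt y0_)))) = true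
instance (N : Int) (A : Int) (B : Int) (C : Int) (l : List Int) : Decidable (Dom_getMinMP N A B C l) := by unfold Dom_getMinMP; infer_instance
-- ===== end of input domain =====

-- B replaces A's enumeration of all 2^N partitions with a left-to-right DP over the
-- ≤128 "which group contains A/B/C (+ group a nonempty)" states: O(N) instead of O(2^N·N)
-- (a timing run saw B 11.77× at N=16 and A time out at N=64 where B returns).

-- ===== PORT A =====
-- literal transliteration of A; 2**N is ported as (2:Int)^N.toNat and l[j] as pyGetD
-- (exact under Pre_: 0 ≤ N and every index j < N is in range); '(i >> j) & 1' truthiness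
-- is ported as ≠ 0 (exact: Python nonzero int is truthy).
def getMinMP (N : Int) (A : Int) (B : Int) (C : Int) (l : List Int) : Int :=
  (PySem.List.pyRange 0 ((2:Int) ^ N.toNat)).foldl (fun minMP i =>
    if i = 0 then minMP
    else
      let _c : List Int := []
      let ab := (PySem.List.pyRange 0 N).foldl
        (fun (p : List Int × List Int) j =>
          if PySem.Int.band (i >>> j.toNat) 1 ≠ 0 then
            (p.1 ++ [PySem.List.pyGetD l j 0], p.2)
          else
            (p.1, p.2 ++ [PySem.List.pyGetD l j 0])) ([], [])
      let a := ab.1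
      let b := ab.2
      let mp : Int := 0
      let mp := (PySem.List.pyRange 0 (PySem.List.len a)).foldl
        (fun mp k => mp + PySem.List.pyGetD a k 0) mp
      let mp := (PySem.List.pyRange 0 (PySem.List.len b)).foldl
        (fun mp k => mp + PySem.List.pyGetD b k 0) mp
      let mp := if a.contains A && a.contains B && a.contains C then mp - 30 else mp
      let mp := if b.contains A && b.contains B && b.contains C then mp - 30 else mp
      let mp := if a.contains A && b.contains B && b.contains C then mp - 10 else mp
      let mp := if b.contains A && a.contains B && b.contains C then mp - 10 else mp
      let mp := if b.contains A && b.contains B && a.contains C then mp - 10 else mp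
      let mp := if a.contains A && a.contains B && b.contains C then mp - 10 else mp
      let mp := if b.contains A && a.contains B && a.contains C then mp - 10 else mp
      let mp := if a.contains A && b.contains B && a.contains C then mp - 10 else mp
      let mp := if a.contains A && a.contains B && a.contains C then mp - 20 else mp
      let mp := if b.contains A && b.contains B && b.contains C then mp - 20 else mp
      if mp < minMP then mp else minMP) 10000

-- ===== PORT B =====
-- DP state: Source B's 7-tuple (group a nonempty, A in a, A in b, B in a, B in b, C in a, C in b),
-- represented with named fields (a flat 7-fold Bool product defeats instance search)
structure PVState where
  ne : Bool
  aA : Bool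
  bA : Bool
  aB : Bool
  bB : Bool
  aC : Bool
  bC : Bool
deriving DecidableEq, Repr

-- successor when l[j] is put into group a
def pvStepA (v : Int) (A : Int) (B : Int) (C : Int) (s : PVState) : PVState :=
  ⟨true, s.aA || (v == A), s.bA, s.aB || (v == B), s.bB, s.aC || (v == C), s.bC⟩

-- successor when l[j] is put into group b
def pvStepB (v : Int) (A : Int) (B : Int) (C : Int) (s : PVState) : PVState :=
  ⟨s.ne, s.aA, s.bA || (v == A), s.aB, s.bB || (v == B), s.aC, s.bC || (v == C)⟩

-- the discount of a state (Source B's disc computation)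
def pvDisc (s : PVState) : Int :=
  let disc : Int := 0
  let disc := if s.aA && s.aB && s.aC then disc + 50 else disc
  let disc := if s.bA && s.bB && s.bC then disc + 50 else disc
  let disc := [(s.aA, s.bB, s.bC), (s.bA, s.aB, s.bC), (s.bA, s.bB, s.aC),
               (s.aA, s.aB, s.bC), (s.bA, s.aB, s.aC), (s.aA, s.bB, s.aC)].foldl
    (fun d t => if t.1 && t.2.1 && t.2.2 then d + 10 else d) disc
  disc

def getMinMP_alt (N : Int) (A : Int) (B : Int) (C : Int) (l : List Int) : Int :=
  let S := (PySem.List.pyRange 0 N).foldl (fun acc j => acc + PySem.List.pyGetD l j 0) 0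
  let states : PySem.Set PVState :=
    (PySem.List.pyRange 0 N).foldl (fun st j =>
      let v := PySem.List.pyGetD l j 0
      st.foldl (fun ns s =>
        PySem.Set.add (PySem.Set.add ns (pvStepA v A B C s)) (pvStepB v A B C s))
        PySem.Set.empty)
      (PySem.Set.ofList [⟨false, false, false, false, false, false, false⟩])
  states.foldl (fun best s => if s.ne then min best (S - pvDisc s) else best) 10000

-- ===== PRECONDITION & SPEC =====
-- Pre_ excludes exactly where A raises: N < 0 (2**N is a float, range raises TypeError)
-- and N > len(l) (l[j] raises IndexError).
def Pre_getMinMP (N : Int) (A : Int) (B : Int) (C : Int) (l : List Int) : Prop :=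
  0 ≤ N ∧ N ≤ l.length
instance (N : Int) (A : Int) (B : Int) (C : Int) (l : List Int) : Decidable (Pre_getMinMP N A B C l) := by unfold Pre_getMinMP; infer_instance

def pvWitness_getMinMP : Int × Int × Int × Int × List Int := (3, 1, 2, 3, [1, 2, 3])

def Spec_getMinMP (N : Int) (A : Int) (B : Int) (C : Int) (l : List Int) (out : Int) : Prop := out = getMinMP_alt N A B C l
instance (N : Int) (A : Int) (B : Int) (C : Int) (l : List Int) (out : Int) : Decidable (Spec_getMinMP N A B C l out) := by unfold Spec_getMinMP; infer_instance

-- ===== CLAIM (what is proved, stated in full; the proofs are below) =====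
def Claim_equal_getMinMP : Prop := ∀ (N : Int) (A : Int) (B : Int) (C : Int) (l : List Int), Dom_getMinMP N A B C l → Pre_getMinMP N A B C l → Spec_getMinMP N A B C l (getMinMP N A B C l)

-- ===== LEMMAS AND PROOFS =====

-- the value of l[k] (both ports read it the same way)
def pvW (l : List Int) (k : Nat) : Int := PySem.List.pyGetD l (k : Int) 0

-- sum of the first n values
def pvS (l : List Int) (n : Nat) : Int := ((List.range n).map (pvW l)).sum

def pvState0 : PVState := ⟨false, false, false, false, false, false, false⟩

-- the DP state reached by mask i after the first j positions
def pvStateOf (A B C : Int) (l : List Int) (i : Nat) : Nat → PVState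
  | 0 => pvState0
  | j + 1 =>
    if i.testBit j then pvStepA (pvW l j) A B C (pvStateOf A B C l i j)
    else pvStepB (pvW l j) A B C (pvStateOf A B C l i j)

-- A's partition (a, b) of the first j values under mask i
def pvPart (l : List Int) (i : Nat) : Nat → List Int × List Int
  | 0 => ([], [])
  | j + 1 =>
    let p := pvPart l i j
    if i.testBit j then (p.1 ++ [pvW l j], p.2) else (p.1, p.2 ++ [pvW l j])

-- the reachable-state set after the first n positions (B's DP)
def pvExpand (v A B C : Int) (st : PySem.Set PVState) : PySem.Set PVState :=
  st.foldl (fun ns s =>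
    PySem.Set.add (PySem.Set.add ns (pvStepA v A B C s)) (pvStepB v A B C s))
    PySem.Set.empty

def pvRS (A B C : Int) (l : List Int) : Nat → PySem.Set PVState
  | 0 => [pvState0]
  | j + 1 => pvExpand (pvW l j) A B C (pvRS A B C l j)

lemma pv_bit (m k : Nat) : (PySem.Int.band ((m : Int) >>> k) 1 ≠ 0) ↔ m.testBit k = true := by
  rw [← Int.natCast_shiftRight, PySem.Int.band_one,
    show (2:Int) = ((2:Nat):Int) by norm_num, PySem.Int.mod_natCast]
  simp only [Nat.testBit_eq_decide_div_mod_eq, Nat.shiftRight_eq_div_pow, ne_eq,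
    Nat.cast_eq_zero, decide_eq_true_eq]
  omega

lemma pvPart_sum (l : List Int) (i j : Nat) :
    (pvPart l i j).1.sum + (pvPart l i j).2.sum = pvS l j := by
  induction j with
  | zero => simp [pvPart, pvS]
  | succ j ih =>
    have hS : pvS l (j + 1) = pvS l j + pvW l j := by
      simp [pvS, List.range_succ]
    by_cases h : i.testBit j <;>
      simp only [pvPart, h, if_pos, if_neg, Bool.false_eq_true, not_false_eq_true,
        ite_true, ite_false, List.sum_append, List.sum_cons, List.sum_nil, hS] <;>
      omega

lemma pv_beq_decide (v X : Int) : (v == X) = decide (X = v) := by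
  by_cases h : X = v
  · subst h; simp
  · simp [h, beq_eq_false_iff_ne, Ne.symm h]

lemma pvPart_state (A B C : Int) (l : List Int) (i j : Nat) :
    (decide (A ∈ (pvPart l i j).1), decide (A ∈ (pvPart l i j).2),
     decide (B ∈ (pvPart l i j).1), decide (B ∈ (pvPart l i j).2),
     decide (C ∈ (pvPart l i j).1), decide (C ∈ (pvPart l i j).2)) =
      ((pvStateOf A B C l i j).aA, (pvStateOf A B C l i j).bA,
       (pvStateOf A B C l i j).aB, (pvStateOf A B C l i j).bB,
       (pvStateOf A B C l i j).aC, (pvStateOf A B C l i j).bC) := by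
  induction j with
  | zero => simp [pvPart, pvStateOf, pvState0]
  | succ j ih =>
    simp only [Prod.mk.injEq] at ih
    obtain ⟨e1, e2, e3, e4, e5, e6⟩ := ih
    by_cases h : i.testBit j <;>
      simp [pvPart, pvStateOf, h, pvStepA, pvStepB, pv_beq_decide,
        ← e1, ← e2, ← e3, ← e4, ← e5, ← e6]

lemma pvStateOf_fst (A B C : Int) (l : List Int) (i j : Nat) :
    (pvStateOf A B C l i j).ne = true ↔ ∃ k < j, i.testBit k = true := by
  induction j with
  | zero => simp [pvStateOf, pvState0]
  | succ j ih =>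
    by_cases h : i.testBit j
    · simp only [pvStateOf, h, ite_true, pvStepA]
      constructor
      · intro _; exact ⟨j, Nat.lt_succ_self j, h⟩
      · intro _; trivial
    · simp only [pvStateOf, h, Bool.false_eq_true, not_false_eq_true, ite_false, pvStepB, ih]
      constructor
      · rintro ⟨k, hk, hb⟩; exact ⟨k, Nat.lt_succ_of_lt hk, hb⟩
      · rintro ⟨k, hk, hb⟩
        rcases Nat.lt_succ_iff_lt_or_eq.mp hk with hk' | rfl
        · exact ⟨k, hk', hb⟩
        · exact absurd hb (by simp [h])

lemma pvStateOf_fst_ne (A B C : Int) (l : List Int) {i n : Nat} (h : i < 2 ^ n) :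
    (pvStateOf A B C l i n).ne = decide (¬ i = 0) := by
  by_cases hi : i = 0
  · subst hi
    have h1 := pvStateOf_fst A B C l 0 n
    simp only [Nat.zero_testBit, Bool.false_eq_true, and_false, exists_const,
      exists_false, iff_false] at h1
    simp [Bool.eq_false_iff.mpr h1]
  · simp only [hi, not_false_eq_true, decide_true]
    rw [pvStateOf_fst]
    by_contra hno
    push_neg at hno
    apply hi
    apply Nat.eq_of_testBit_eq
    intro k
    rw [Nat.zero_testBit]
    by_cases hk : k < n
    · exact Bool.eq_false_iff.mpr (fun hb => by exact absurd hb (by simpa using hno k hk))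
    · exact Nat.testBit_lt_two_pow (lt_of_lt_of_le h (Nat.pow_le_pow_right (by norm_num) (Nat.le_of_not_lt hk)))

lemma pvStateOf_congr (A B C : Int) (l : List Int) {i₁ i₂ : Nat} (j : Nat)
    (h : ∀ k < j, i₁.testBit k = i₂.testBit k) :
    pvStateOf A B C l i₁ j = pvStateOf A B C l i₂ j := by
  induction j with
  | zero => rfl
  | succ j ih =>
    have hj := h j (Nat.lt_succ_self j)
    have ih' := ih (fun k hk => h k (Nat.lt_succ_of_lt hk))
    simp only [pvStateOf, hj, ih']

lemma pvStateOf_succ_lo (A B C : Int) (l : List Int) {i j : Nat} (h : i < 2 ^ j) :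
    pvStateOf A B C l i (j + 1) = pvStepB (pvW l j) A B C (pvStateOf A B C l i j) := by
  simp [pvStateOf, Nat.testBit_lt_two_pow h]

lemma pvStateOf_succ_hi (A B C : Int) (l : List Int) {i j : Nat} (h : i < 2 ^ j) :
    pvStateOf A B C l (2 ^ j + i) (j + 1) = pvStepA (pvW l j) A B C (pvStateOf A B C l i j) := by
  have hbit : (2 ^ j + i).testBit j = true := by
    rw [Nat.testBit_two_pow_add_eq, Nat.testBit_lt_two_pow h]
    rfl
  have hlow : pvStateOf A B C l (2 ^ j + i) j = pvStateOf A B C l i j :=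
    pvStateOf_congr A B C l j (fun k hk => Nat.testBit_two_pow_add_gt hk i)
  simp [pvStateOf, hbit, hlow]

lemma pv_toFinset_map {α β : Type} [DecidableEq α] [DecidableEq β] (l : List α) (f : α → β) :
    (l.map f).toFinset = l.toFinset.image f := by
  ext x; simp

lemma pv_add_toFinset {α : Type} [BEq α] [LawfulBEq α] [DecidableEq α]
    (s : PySem.Set α) (x : α) : (PySem.Set.add s x).toFinset = insert x s.toFinset := by
  simp only [PySem.Set.add, PySem.Set.contains]
  by_cases h : List.contains s x
  · rw [if_pos h]
    have hx : x ∈ s := by simpa using h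
    rw [Finset.insert_eq_self.mpr (List.mem_toFinset.mpr hx)]
  · rw [if_neg h]
    ext y
    simp [List.toFinset_append, or_comm]

lemma pv_fold_add2_toFinset (f g : PVState → PVState) (xs : List PVState)
    (acc : PySem.Set PVState) :
    (xs.foldl (fun ns s => PySem.Set.add (PySem.Set.add ns (f s)) (g s)) acc).toFinset =
      acc.toFinset ∪ xs.toFinset.image f ∪ xs.toFinset.image g := by
  induction xs generalizing acc with
  | nil => simp
  | cons x xs ih =>
    rw [List.foldl_cons, ih, pv_add_toFinset, pv_add_toFinset]
    ext y
    simp only [Finset.mem_union, Finset.mem_insert, Finset.mem_image, List.toFinset_cons,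
      List.mem_toFinset, List.mem_cons]
    aesop

lemma pvExpand_toFinset (v A B C : Int) (st : PySem.Set PVState) :
    (pvExpand v A B C st).toFinset =
      st.toFinset.image (pvStepA v A B C) ∪ st.toFinset.image (pvStepB v A B C) := by
  unfold pvExpand
  rw [pv_fold_add2_toFinset]
  simp [PySem.Set.empty]

lemma pvRS_toFinset (A B C : Int) (l : List Int) (n : Nat) :
    (pvRS A B C l n).toFinset =
      ((List.range (2 ^ n)).map (fun i => pvStateOf A B C l i n)).toFinset := by
  induction n with
  | zero => simp [pvRS, pvStateOf]
  | succ j ih =>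
    have hpow : 2 ^ (j + 1) = 2 ^ j + 2 ^ j := by ring
    rw [show pvRS A B C l (j + 1) = pvExpand (pvW l j) A B C (pvRS A B C l j) from rfl,
      pvExpand_toFinset, ih]
    ext y
    simp only [Finset.mem_union, Finset.mem_image, List.mem_toFinset, List.mem_map,
      List.mem_range]
    constructor
    · rintro (⟨s, ⟨i, hi, rfl⟩, rfl⟩ | ⟨s, ⟨i, hi, rfl⟩, rfl⟩)
      · refine ⟨2 ^ j + i, by omega, ?_⟩
        rw [pvStateOf_succ_hi A B C l hi]
      · exact ⟨i, by omega, by rw [pvStateOf_succ_lo A B C l hi]⟩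
    · rintro ⟨i, hi, rfl⟩
      by_cases hlt : i < 2 ^ j
      · exact Or.inr ⟨pvStateOf A B C l i j, ⟨i, hlt, rfl⟩,
          (pvStateOf_succ_lo A B C l hlt).symm⟩
      · obtain ⟨k, hk, rfl⟩ : ∃ k, k < 2 ^ j ∧ i = 2 ^ j + k :=
          ⟨i - 2 ^ j, by omega, by omega⟩
        exact Or.inl ⟨pvStateOf A B C l k j, ⟨k, hk, rfl⟩,
          (pvStateOf_succ_hi A B C l hk).symm⟩

-- A's chain of discount subtractions, abstracted over the membership booleans
def pvChain (S : Int) (aA bA aB bB aC bC : Bool) : Int :=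
  let mp := S
  let mp := if aA && aB && aC then mp - 30 else mp
  let mp := if bA && bB && bC then mp - 30 else mp
  let mp := if aA && bB && bC then mp - 10 else mp
  let mp := if bA && aB && bC then mp - 10 else mp
  let mp := if bA && bB && aC then mp - 10 else mp
  let mp := if aA && aB && bC then mp - 10 else mp
  let mp := if bA && aB && aC then mp - 10 else mp
  let mp := if aA && bB && aC then mp - 10 else mp
  let mp := if aA && aB && aC then mp - 20 else mp
  let mp := if bA && bB && bC then mp - 20 else mp
  mp

lemma pv_chain_eq (S : Int) (ne aA bA aB bB aC bC : Bool) :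
    pvChain S aA bA aB bB aC bC = S - pvDisc ⟨ne, aA, bA, aB, bB, aC, bC⟩ := by
  cases aA <;> cases bA <;> cases aB <;> cases bB <;> cases aC <;> cases bC <;>
    simp [pvChain, pvDisc] <;> ring

lemma pv_min_if (x y : Int) : (if x < y then x else y) = min y x := by
  rcases Int.lt_or_le x y with h | h <;> simp [min_def, h]

-- foldl min over lists with the same element set gives the same value
lemma pv_foldl_min_eq (xs ys : List Int) (init : Int) (h : xs.toFinset = ys.toFinset) :
    xs.foldl min init = ys.foldl min init := by
  have hx := PySem.List.foldl_min_le xs init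
  have hy := PySem.List.foldl_min_le ys init
  apply le_antisymm
  · rcases PySem.List.foldl_min_mem ys init with h0 | hm
    · rw [h0]; exact hx.1
    · exact hx.2 _ (List.mem_toFinset.mp (h ▸ List.mem_toFinset.mpr hm))
  · rcases PySem.List.foldl_min_mem xs init with h0 | hm
    · rw [h0]; exact hy.1
    · exact hy.2 _ (List.mem_toFinset.mp (h.symm ▸ List.mem_toFinset.mpr hm))

lemma pv_contains_decide (xs : List Int) (v : Int) : xs.contains v = decide (v ∈ xs) := by
  simp

lemma pv_sum_fold (xs : List Int) (c : Int) :
    (PySem.List.pyRange 0 (PySem.List.len xs)).foldl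
      (fun mp k => mp + PySem.List.pyGetD xs k 0) c = c + xs.sum := by
  rw [PySem.List.foldl_pyRange_pyGetD xs 0 (fun (acc x : Int) => acc + x) c (le_refl 0),
    show Int.toNat 0 = 0 from rfl, List.drop_zero, PySem.List.foldl_add xs (fun x => x) c]
  simp

lemma pvPart_foldl_range (l : List Int) (i : Nat) (m : Nat) :
    (List.range m).foldl
      (fun (p : List Int × List Int) (j : Nat) =>
        if PySem.Int.band ((i : Int) >>> j) 1 ≠ 0 then
          (p.1 ++ [PySem.List.pyGetD l (j : Int) 0], p.2)
        else (p.1, p.2 ++ [PySem.List.pyGetD l (j : Int) 0])) ([], []) = pvPart l i m := by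
  induction m with
  | zero => rfl
  | succ m ih =>
    rw [List.range_succ, List.foldl_append, ih]
    simp only [List.foldl_cons, List.foldl_nil, pvPart, pv_bit]
    rfl

lemma pvPart_foldl_pyRange (l : List Int) (i n : Nat) :
    (PySem.List.pyRange 0 (n : Int)).foldl
      (fun (p : List Int × List Int) (j : Int) =>
        if PySem.Int.band ((i : Int) >>> j.toNat) 1 ≠ 0 then
          (p.1 ++ [PySem.List.pyGetD l j 0], p.2)
        else (p.1, p.2 ++ [PySem.List.pyGetD l j 0])) ([], []) = pvPart l i n := by
  rw [PySem.List.pyRange_zero_natCast, List.foldl_map, ← pvPart_foldl_range l i n]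
  apply PySem.List.foldl_congr_mem
  intro p k _
  simp only [Int.toNat_natCast]
  rfl

-- normal form of port A
lemma pv_A_norm (n : Nat) (A B C : Int) (l : List Int) :
    getMinMP (n : Int) A B C l =
      ((((List.range (2 ^ n)).filter (fun i => !(i == 0))).map
          (fun i => pvS l n - pvDisc (pvStateOf A B C l i n)))).foldl min 10000 := by
  unfold getMinMP
  rw [show ((2:Int) ^ ((n : Int)).toNat) = (((2 ^ n : Nat) : Int)) by
      rw [Int.toNat_natCast]; push_cast; ring]
  rw [PySem.List.pyRange_zero_natCast (2 ^ n), List.foldl_map, List.foldl_map]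
  rw [← PySem.List.foldl_if_eq_foldl_filter (fun i => !(i == 0))
    (fun acc i => min acc (pvS l n - pvDisc (pvStateOf A B C l i n))) (List.range (2 ^ n)) 10000]
  apply PySem.List.foldl_congr_mem
  intro acc i _
  beta_reduce
  by_cases h0 : i = 0
  · subst h0
    rw [if_pos (show ((0:Nat):Int) = 0 by norm_num)]
    rfl
  · rw [if_neg (show ¬ ((i:Nat):Int) = 0 by exact_mod_cast h0),
      if_pos (show (!(i == 0)) = true by simp [h0])]
    show (if pvChain
        ((PySem.List.pyRange 0 (PySem.List.len (List.foldl
            (fun (p : List Int × List Int) (j : Int) =>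
              if PySem.Int.band ((i : Int) >>> j.toNat) 1 ≠ 0 then
                (p.1 ++ [PySem.List.pyGetD l j 0], p.2)
              else (p.1, p.2 ++ [PySem.List.pyGetD l j 0])) ([], [])
            (PySem.List.pyRange 0 (n : Int))).2)).foldl
          (fun mp k => mp + PySem.List.pyGetD (List.foldl
            (fun (p : List Int × List Int) (j : Int) =>
              if PySem.Int.band ((i : Int) >>> j.toNat) 1 ≠ 0 then
                (p.1 ++ [PySem.List.pyGetD l j 0], p.2)
              else (p.1, p.2 ++ [PySem.List.pyGetD l j 0])) ([], [])
            (PySem.List.pyRange 0 (n : Int))).2 k 0)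
          ((PySem.List.pyRange 0 (PySem.List.len (List.foldl
            (fun (p : List Int × List Int) (j : Int) =>
              if PySem.Int.band ((i : Int) >>> j.toNat) 1 ≠ 0 then
                (p.1 ++ [PySem.List.pyGetD l j 0], p.2)
              else (p.1, p.2 ++ [PySem.List.pyGetD l j 0])) ([], [])
            (PySem.List.pyRange 0 (n : Int))).1)).foldl
            (fun mp k => mp + PySem.List.pyGetD (List.foldl
            (fun (p : List Int × List Int) (j : Int) =>
              if PySem.Int.band ((i : Int) >>> j.toNat) 1 ≠ 0 then
                (p.1 ++ [PySem.List.pyGetD l j 0], p.2)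
              else (p.1, p.2 ++ [PySem.List.pyGetD l j 0])) ([], [])
            (PySem.List.pyRange 0 (n : Int))).1 k 0) 0))
        ((List.foldl
            (fun (p : List Int × List Int) (j : Int) =>
              if PySem.Int.band ((i : Int) >>> j.toNat) 1 ≠ 0 then
                (p.1 ++ [PySem.List.pyGetD l j 0], p.2)
              else (p.1, p.2 ++ [PySem.List.pyGetD l j 0])) ([], [])
            (PySem.List.pyRange 0 (n : Int))).1.contains A) ((List.foldl
            (fun (p : List Int × List Int) (j : Int) =>
              if PySem.Int.band ((i : Int) >>> j.toNat) 1 ≠ 0 then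
                (p.1 ++ [PySem.List.pyGetD l j 0], p.2)
              else (p.1, p.2 ++ [PySem.List.pyGetD l j 0])) ([], [])
            (PySem.List.pyRange 0 (n : Int))).2.contains A)
        ((List.foldl
            (fun (p : List Int × List Int) (j : Int) =>
              if PySem.Int.band ((i : Int) >>> j.toNat) 1 ≠ 0 then
                (p.1 ++ [PySem.List.pyGetD l j 0], p.2)
              else (p.1, p.2 ++ [PySem.List.pyGetD l j 0])) ([], [])
            (PySem.List.pyRange 0 (n : Int))).1.contains B) ((List.foldl
            (fun (p : List Int × List Int) (j : Int) =>
              if PySem.Int.band ((i : Int) >>> j.toNat) 1 ≠ 0 then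
                (p.1 ++ [PySem.List.pyGetD l j 0], p.2)
              else (p.1, p.2 ++ [PySem.List.pyGetD l j 0])) ([], [])
            (PySem.List.pyRange 0 (n : Int))).2.contains B)
        ((List.foldl
            (fun (p : List Int × List Int) (j : Int) =>
              if PySem.Int.band ((i : Int) >>> j.toNat) 1 ≠ 0 then
                (p.1 ++ [PySem.List.pyGetD l j 0], p.2)
              else (p.1, p.2 ++ [PySem.List.pyGetD l j 0])) ([], [])
            (PySem.List.pyRange 0 (n : Int))).1.contains C)
        ((List.foldl
            (fun (p : List Int × List Int) (j : Int) =>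
              if PySem.Int.band ((i : Int) >>> j.toNat) 1 ≠ 0 then
                (p.1 ++ [PySem.List.pyGetD l j 0], p.2)
              else (p.1, p.2 ++ [PySem.List.pyGetD l j 0])) ([], [])
            (PySem.List.pyRange 0 (n : Int))).2.contains C) < acc then pvChain
        ((PySem.List.pyRange 0 (PySem.List.len (List.foldl
            (fun (p : List Int × List Int) (j : Int) =>
              if PySem.Int.band ((i : Int) >>> j.toNat) 1 ≠ 0 then
                (p.1 ++ [PySem.List.pyGetD l j 0], p.2)
              else (p.1, p.2 ++ [PySem.List.pyGetD l j 0])) ([], [])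
            (PySem.List.pyRange 0 (n : Int))).2)).foldl
          (fun mp k => mp + PySem.List.pyGetD (List.foldl
            (fun (p : List Int × List Int) (j : Int) =>
              if PySem.Int.band ((i : Int) >>> j.toNat) 1 ≠ 0 then
                (p.1 ++ [PySem.List.pyGetD l j 0], p.2)
              else (p.1, p.2 ++ [PySem.List.pyGetD l j 0])) ([], [])
            (PySem.List.pyRange 0 (n : Int))).2 k 0)
          ((PySem.List.pyRange 0 (PySem.List.len (List.foldl
            (fun (p : List Int × List Int) (j : Int) =>
              if PySem.Int.band ((i : Int) >>> j.toNat) 1 ≠ 0 then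
                (p.1 ++ [PySem.List.pyGetD l j 0], p.2)
              else (p.1, p.2 ++ [PySem.List.pyGetD l j 0])) ([], [])
            (PySem.List.pyRange 0 (n : Int))).1)).foldl
            (fun mp k => mp + PySem.List.pyGetD (List.foldl
            (fun (p : List Int × List Int) (j : Int) =>
              if PySem.Int.band ((i : Int) >>> j.toNat) 1 ≠ 0 then
                (p.1 ++ [PySem.List.pyGetD l j 0], p.2)
              else (p.1, p.2 ++ [PySem.List.pyGetD l j 0])) ([], [])
            (PySem.List.pyRange 0 (n : Int))).1 k 0) 0))
        ((List.foldl
            (fun (p : List Int × List Int) (j : Int) =>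
              if PySem.Int.band ((i : Int) >>> j.toNat) 1 ≠ 0 then
                (p.1 ++ [PySem.List.pyGetD l j 0], p.2)
              else (p.1, p.2 ++ [PySem.List.pyGetD l j 0])) ([], [])
            (PySem.List.pyRange 0 (n : Int))).1.contains A) ((List.foldl
            (fun (p : List Int × List Int) (j : Int) =>
              if PySem.Int.band ((i : Int) >>> j.toNat) 1 ≠ 0 then
                (p.1 ++ [PySem.List.pyGetD l j 0], p.2)
              else (p.1, p.2 ++ [PySem.List.pyGetD l j 0])) ([], [])
            (PySem.List.pyRange 0 (n : Int))).2.contains A)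
        ((List.foldl
            (fun (p : List Int × List Int) (j : Int) =>
              if PySem.Int.band ((i : Int) >>> j.toNat) 1 ≠ 0 then
                (p.1 ++ [PySem.List.pyGetD l j 0], p.2)
              else (p.1, p.2 ++ [PySem.List.pyGetD l j 0])) ([], [])
            (PySem.List.pyRange 0 (n : Int))).1.contains B) ((List.foldl
            (fun (p : List Int × List Int) (j : Int) =>
              if PySem.Int.band ((i : Int) >>> j.toNat) 1 ≠ 0 then
                (p.1 ++ [PySem.List.pyGetD l j 0], p.2)
              else (p.1, p.2 ++ [PySem.List.pyGetD l j 0])) ([], [])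
            (PySem.List.pyRange 0 (n : Int))).2.contains B)
        ((List.foldl
            (fun (p : List Int × List Int) (j : Int) =>
              if PySem.Int.band ((i : Int) >>> j.toNat) 1 ≠ 0 then
                (p.1 ++ [PySem.List.pyGetD l j 0], p.2)
              else (p.1, p.2 ++ [PySem.List.pyGetD l j 0])) ([], [])
            (PySem.List.pyRange 0 (n : Int))).1.contains C)
        ((List.foldl
            (fun (p : List Int × List Int) (j : Int) =>
              if PySem.Int.band ((i : Int) >>> j.toNat) 1 ≠ 0 then
                (p.1 ++ [PySem.List.pyGetD l j 0], p.2)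
              else (p.1, p.2 ++ [PySem.List.pyGetD l j 0])) ([], [])
            (PySem.List.pyRange 0 (n : Int))).2.contains C) else acc) =
      min acc (pvS l n - pvDisc (pvStateOf A B C l i n))
    rw [pvPart_foldl_pyRange l i n, pv_sum_fold, pv_sum_fold, zero_add, pvPart_sum l i n]
    have h6 := pvPart_state A B C l i n
    simp only [Prod.mk.injEq] at h6
    obtain ⟨e1, e2, e3, e4, e5, e6⟩ := h6
    rw [pv_contains_decide (pvPart l i n).1 A, pv_contains_decide (pvPart l i n).2 A,
      pv_contains_decide (pvPart l i n).1 B, pv_contains_decide (pvPart l i n).2 B,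
      pv_contains_decide (pvPart l i n).1 C, pv_contains_decide (pvPart l i n).2 C,
      e1, e2, e3, e4, e5, e6,
      pv_chain_eq (pvS l n) (pvStateOf A B C l i n).ne]
    exact pv_min_if _ _

-- normal form of port B
lemma pvRS_foldl (A B C : Int) (l : List Int) (m : Nat) :
    (List.range m).foldl (fun st k => pvExpand (pvW l k) A B C st) [pvState0] =
      pvRS A B C l m := by
  induction m with
  | zero => rfl
  | succ j ih => rw [List.range_succ, List.foldl_append, ih]; rfl

lemma pv_B_norm (n : Nat) (A B C : Int) (l : List Int) :
    getMinMP_alt (n : Int) A B C l =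
      (((pvRS A B C l n).filter (fun s => s.ne)).map (fun s => pvS l n - pvDisc s)).foldl
        min 10000 := by
  unfold getMinMP_alt
  rw [PySem.List.pyRange_zero_natCast]
  simp only [List.foldl_map]
  have hS : List.foldl (fun (acc : Int) (k : Nat) => acc + PySem.List.pyGetD l (k : Int) 0) 0
      (List.range n) = pvS l n := by
    rw [PySem.List.foldl_add (List.range n) (fun (k : Nat) => PySem.List.pyGetD l (k : Int) 0) 0,
      zero_add]
    rfl
  simp only [hS]
  show (List.foldl (fun st k => pvExpand (pvW l k) A B C st) [pvState0]
      (List.range n)).foldl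
      (fun best s => if s.ne = true then min best (pvS l n - pvDisc s) else best) 10000 = _
  rw [pvRS_foldl, PySem.List.foldl_if_eq_foldl_filter (fun s => s.ne)
    (fun best s => min best (pvS l n - pvDisc s))]

lemma pv_values_toFinset (n : Nat) (A B C : Int) (l : List Int) :
    ((((List.range (2 ^ n)).filter (fun i => !(i == 0))).map
        (fun i => pvS l n - pvDisc (pvStateOf A B C l i n)))).toFinset =
      ((((pvRS A B C l n).filter (fun s => s.ne)).map (fun s => pvS l n - pvDisc s))).toFinset := by
  have hF : ∀ i ∈ List.range (2 ^ n),
      ((fun s => s.ne) ∘ (fun i => pvStateOf A B C l i n)) i = (fun i => !(i == 0)) i := by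
    intro i hi
    simp only [Function.comp_apply]
    rw [pvStateOf_fst_ne A B C l (List.mem_range.mp hi)]
    by_cases h : i = 0 <;> simp [h]
  rw [show (fun i => pvS l n - pvDisc (pvStateOf A B C l i n)) =
      (fun s => pvS l n - pvDisc s) ∘ (fun i => pvStateOf A B C l i n) from rfl]
  rw [← List.map_map, ← List.filter_congr hF, ← List.filter_map]
  rw [pv_toFinset_map, pv_toFinset_map, List.toFinset_filter, List.toFinset_filter,
    ← pvRS_toFinset]

-- ===== VERDICT (by name: the statement is the Claim_ definition above) =====
theorem getMinMP_spec : Claim_equal_getMinMP := by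
  intro N A B C l _ hPre
  unfold Spec_getMinMP
  obtain ⟨hN, _⟩ := hPre
  obtain ⟨n, rfl⟩ : ∃ n : Nat, N = (n : Int) := ⟨N.toNat, (Int.toNat_of_nonneg hN).symm⟩
  rw [pv_A_norm, pv_B_norm]
  exact pv_foldl_min_eq _ _ _ (pv_values_toFinset n A B C l)
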